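-- pv_equiv track=rewrite | github.com/KarchinLab/mhcnuggets | mhcnuggets/src/get_candidate_neoantigens.py | window_around_mutation
-- ===== SOURCE A (Python) =====
-- def get_pep_sequence(seq,length,mutpos):
--     peplist,mutloc=[],[]
--     for i in range(0,len(seq)-length+1):
--         pep=seq[i:i+length]
--         pep_mutloc=max(length-i,0)
--         if 'U' not in pep:
--             peplist.append(pep)
--             mutloc.append(pep_mutloc)
--     return peplist,mutloc
--
-- def window_around_mutation(mutpos,mut_seq,orig_seq,lengths):
--     ref_peps,mut_peps,pep_mutpos=[],[],[]
--     for l in lengths: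
--         mut_seq_l=mut_seq[max(mutpos-l+1,0):mutpos+l]
--         ref_seq_l=orig_seq[max(mutpos-l+1,0):mutpos+l]
--         new_mutpos=max(mutpos-l+1,0)
--         mut_seq_peps,mutloc=get_pep_sequence(mut_seq_l,l,new_mutpos)
--         ref_seq_peps,_=get_pep_sequence(ref_seq_l,l,new_mutpos)
--         mut_peps.extend(mut_seq_peps)
--         ref_peps.extend(ref_seq_peps)
--         pep_mutpos.extend(mutloc)
--     return mut_peps,ref_peps,pep_mutpos
-- ===== SOURCE B (Python) =====
-- def _u_free(w, l):
--     # U-free length-l windows of w with their mutation offsets, found by a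
--     # rolling count of 'U' in the sliding window instead of scanning each peptide
--     res = []
--     u = w[:l].count('U')
--     for i in range(len(w) - l + 1):
--         if i > 0:
--             u += w[i + l - 1:i + l].count('U') - w[i - 1:i].count('U')
--         if u == 0:
--             res.append((w[i:i + l], l - i if l > i else 0))
--     return res
--
-- def window_around_mutation(mutpos, mut_seq, orig_seq, lengths):
--     mut_peps, ref_peps, pep_mutpos = [], [], []
--     for l in lengths:
--         start = max(mutpos - l + 1, 0)
--         for pep, loc in _u_free(mut_seq[start:mutpos + l], l):
--             mut_peps.append(pep)
--             pep_mutpos.append(loc)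
--         ref_peps.extend(pep for pep, _ in _u_free(orig_seq[start:mutpos + l], l))
--     return mut_peps, ref_peps, pep_mutpos
-- ===== Notes on version B (the rewrite author's own statement) =====
-- stated objective: alternative
-- what changed: B replaces A's per-peptide 'U' membership scan ('U' not in pep for every window) by a rolling count of 'U' in the sliding window, updated in O(1) per shift from the departing and arriving characters; a peptide is kept iff the count is zero.
import Mathlib
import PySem

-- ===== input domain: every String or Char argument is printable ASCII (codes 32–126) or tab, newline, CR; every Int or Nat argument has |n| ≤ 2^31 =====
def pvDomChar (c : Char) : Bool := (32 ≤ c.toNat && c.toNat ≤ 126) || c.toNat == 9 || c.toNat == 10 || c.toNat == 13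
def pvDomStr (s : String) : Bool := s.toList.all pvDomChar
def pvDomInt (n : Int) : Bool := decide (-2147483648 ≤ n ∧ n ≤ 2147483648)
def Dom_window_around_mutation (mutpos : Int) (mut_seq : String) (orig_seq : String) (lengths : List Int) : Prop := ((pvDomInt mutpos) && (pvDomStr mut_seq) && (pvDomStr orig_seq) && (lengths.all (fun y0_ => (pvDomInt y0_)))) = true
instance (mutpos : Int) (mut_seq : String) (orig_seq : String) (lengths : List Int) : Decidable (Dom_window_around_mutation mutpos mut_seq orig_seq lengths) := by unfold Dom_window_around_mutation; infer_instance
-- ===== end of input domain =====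

-- B replaces A's per-peptide 'U' membership scan by a rolling count of 'U' in the
-- sliding window, updated from the departing/arriving characters (objective: alternative).

-- ===== PORT A =====
def getPepSequence (seq : String) (length : Int) (_mutpos : Int) : List String × List Int :=
  (PySem.List.pyRange 0 (PySem.Str.len seq - length + 1) 1).foldl
    (fun (acc : List String × List Int) i =>
      let pep := PySem.Str.slice seq (some i) (some (i + length))
      let pep_mutloc := max (length - i) 0
      if PySem.Str.isIn "U" pep = false then (acc.1 ++ [pep], acc.2 ++ [pep_mutloc]) else acc)
    ([], [])

def window_around_mutation (mutpos : Int) (mut_seq : String) (orig_seq : String) (lengths : List Int) : List String × List String × List Int :=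
  lengths.foldl
    (fun (acc : List String × List String × List Int) l =>
      let mut_seq_l := PySem.Str.slice mut_seq (some (max (mutpos - l + 1) 0)) (some (mutpos + l))
      let ref_seq_l := PySem.Str.slice orig_seq (some (max (mutpos - l + 1) 0)) (some (mutpos + l))
      let new_mutpos := max (mutpos - l + 1) 0
      let mutRes := getPepSequence mut_seq_l l new_mutpos
      let refRes := getPepSequence ref_seq_l l new_mutpos
      (acc.1 ++ mutRes.1, acc.2.1 ++ refRes.1, acc.2.2 ++ mutRes.2))
    ([], [], [])

-- ===== PORT B =====
-- Source B's _u_free: a rolling count u of 'U' in the current window, updated per shift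
def uFree (w : String) (l : Int) : List (String × Int) :=
  ((PySem.List.pyRange 0 (PySem.Str.len w - l + 1) 1).foldl
    (fun (acc : List (String × Int) × Int) i =>
      let u : Int := if 0 < i then
          acc.2 + (PySem.Str.count (PySem.Str.slice w (some (i + l - 1)) (some (i + l))) "U" : Int)
                - (PySem.Str.count (PySem.Str.slice w (some (i - 1)) (some i)) "U" : Int)
        else acc.2
      if u = 0 then
        (acc.1 ++ [(PySem.Str.slice w (some i) (some (i + l)), if i < l then l - i else 0)], u)
      else (acc.1, u))
    ([], (PySem.Str.count (PySem.Str.slice w none (some l)) "U" : Int))).1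

def window_around_mutation_alt (mutpos : Int) (mut_seq : String) (orig_seq : String) (lengths : List Int) : List String × List String × List Int :=
  lengths.foldl
    (fun (acc : List String × List String × List Int) l =>
      let start := max (mutpos - l + 1) 0
      let mres := (uFree (PySem.Str.slice mut_seq (some start) (some (mutpos + l))) l).foldl
        (fun (a : List String × List Int) pm => (a.1 ++ [pm.1], a.2 ++ [pm.2])) (acc.1, acc.2.2)
      (mres.1,
       acc.2.1 ++ (uFree (PySem.Str.slice orig_seq (some start) (some (mutpos + l))) l).map Prod.fst,
       mres.2))
    ([], [], [])

-- ===== PRECONDITION & SPEC =====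
-- Pre_ excludes only negative peptide lengths whose window contains 'U': there A's
-- "peptides" are artefacts of Python's negative-stop slice wraparound that B's rolling
-- count does not reproduce; all l ≥ 0, and negative l over 'U'-free windows, are included.
def Pre_window_around_mutation (mutpos : Int) (mut_seq : String) (orig_seq : String) (lengths : List Int) : Prop :=
  ∀ l ∈ lengths, 1 ≤ l ∨ l = 0 ∨
    (PySem.Str.isIn "U" (PySem.Str.slice mut_seq (some (max (mutpos - l + 1) 0)) (some (mutpos + l))) = false ∧
     PySem.Str.isIn "U" (PySem.Str.slice orig_seq (some (max (mutpos - l + 1) 0)) (some (mutpos + l))) = false)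
instance (mutpos : Int) (mut_seq : String) (orig_seq : String) (lengths : List Int) : Decidable (Pre_window_around_mutation mutpos mut_seq orig_seq lengths) := by unfold Pre_window_around_mutation; infer_instance

def pvWitness_window_around_mutation : Int × String × String × List Int := (2, "MKVUAW", "MKVLAW", [2, 3])

def Spec_window_around_mutation (mutpos : Int) (mut_seq : String) (orig_seq : String) (lengths : List Int) (out : List String × List String × List Int) : Prop := out = window_around_mutation_alt mutpos mut_seq orig_seq lengths
instance (mutpos : Int) (mut_seq : String) (orig_seq : String) (lengths : List Int) (out : List String × List String × List Int) : Decidable (Spec_window_around_mutation mutpos mut_seq orig_seq lengths out) := by unfold Spec_window_around_mutation; infer_instance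

-- ===== CLAIM (what is proved, stated in full; the proofs are below) =====
def Claim_equal_window_around_mutation : Prop := ∀ (mutpos : Int) (mut_seq : String) (orig_seq : String) (lengths : List Int), Dom_window_around_mutation mutpos mut_seq orig_seq lengths → Pre_window_around_mutation mutpos mut_seq orig_seq lengths → Spec_window_around_mutation mutpos mut_seq orig_seq lengths (window_around_mutation mutpos mut_seq orig_seq lengths)

-- ===== LEMMAS AND PROOFS =====

-- Python's s.count(sub) for a single-character sub is the character count
theorem countGo_single (c : Char) : ∀ (cs : List Char) (n acc : Nat), cs.length ≤ n →
    PySem.Chars.count.go [c] n cs acc = acc + cs.count c := by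
  intro cs
  induction cs with
  | nil => intro n acc h; cases n <;> simp [PySem.Chars.count.go]
  | cons h t ih =>
    intro n acc hle
    cases n with
    | zero => simp at hle
    | succ m =>
      have hlen : t.length ≤ m := by simpa using hle
      rw [PySem.Chars.count.go]
      by_cases hc : c = h
      · subst hc
        simp [List.isPrefixOf, ih m (acc+1) hlen]
        omega
      · simp [List.isPrefixOf, Ne.symm hc, hc, ih m acc hlen]

theorem count_single (c : Char) (cs : List Char) : PySem.Chars.count cs [c] = cs.count c := by
  simp [PySem.Chars.count, countGo_single c cs cs.length 0 le_rfl]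

-- Str.count over a natural-bounds slice, on the list side
theorem count_slice_nat (w : String) (a b : Nat) :
    PySem.Str.count (PySem.Str.slice w (some (a : Int)) (some (b : Int))) "U"
      = ((w.toList.drop a).take (b - a)).count 'U' := by
  have h : "U".toList = ['U'] := rfl
  simp [PySem.Str.toList_slice, PySem.Chars.slice_eq_listSlice, PySem.List.slice_natCast, h,
        count_single]

-- the 'U'-count of the shifted window, via the departing and the arriving character
theorem roll (xs : List Char) (l k : Nat) (hl : 1 ≤ l) (h1 : 1 ≤ k) (hn : k + l ≤ xs.length) :
    ((xs.drop k).take l).count 'U' + ((xs.drop (k-1)).take 1).count 'U'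
      = ((xs.drop (k-1)).take l).count 'U' + ((xs.drop (k+l-1)).take 1).count 'U' := by
  obtain ⟨j, rfl⟩ : ∃ j, k = j + 1 := ⟨k - 1, by omega⟩
  obtain ⟨l', rfl⟩ : ∃ l', l = l' + 1 := ⟨l - 1, by omega⟩
  have hj : j < xs.length := by omega
  have hd : xs.drop j = xs[j] :: xs.drop (j+1) := List.drop_eq_getElem_cons hj
  have hlen : l' < (xs.drop (j+1)).length := by simp; omega
  have hget : (xs.drop (j+1))[l'] = xs[j+1+l']'(by omega) := by
    simp [List.getElem_drop]
  have e1 : ((xs.drop j).take (l'+1)) = xs[j] :: (xs.drop (j+1)).take l' := by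
    rw [hd, List.take_succ_cons]
  have e2 : ((xs.drop j).take 1) = [xs[j]] := by rw [hd, List.take_succ_cons, List.take_zero]
  have e3 : (xs.drop (j+1)).take (l'+1) = (xs.drop (j+1)).take l' ++ [xs[j+1+l']'(by omega)] := by
    rw [List.take_add_one]
    simp [List.getElem?_eq_getElem hlen, hget]
  have hd2 : xs.drop (j+1+l') = xs[j+1+l']'(by omega) :: xs.drop (j+1+l'+1) :=
    List.drop_eq_getElem_cons (by omega)
  have e4 : ((xs.drop (j+1+l')).take 1) = [xs[j+1+l']'(by omega)] := by
    rw [hd2, List.take_succ_cons, List.take_zero]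
  simp only [Nat.add_sub_cancel, show j + 1 + (l'+1) - 1 = j+1+l' by omega]
  rw [e1, e2, e3, e4]
  simp [List.count_cons, List.count_append]
  omega

-- the window-count abbreviation used by the invariant
def cntW (w : String) (l : Int) (i : Int) : Nat := ((w.toList.drop i.toNat).take l.toNat).count 'U'

theorem u0_eq (w : String) (l : Int) (hl : 1 ≤ l) :
    PySem.Str.count (PySem.Str.slice w none (some l)) "U" = cntW w l 0 := by
  have h : "U".toList = ['U'] := rfl
  rw [PySem.Str.count_eq, PySem.Str.toList_slice, PySem.Chars.slice_eq_listSlice,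
      PySem.List.slice_to w.toList (by omega : (0:Int) ≤ l), h, count_single]
  simp [cntW]

-- loop invariant of B's rolling-count fold: u is the 'U'-count of the last window visited
theorem uFree_inv (w : String) (l : Int) (hl : 1 ≤ l) :
    ∀ (k : Nat), (k : Int) ≤ PySem.Str.len w - l + 1 →
      (PySem.List.pyRange 0 (k : Int) 1).foldl
        (fun (acc : List (String × Int) × Int) i =>
          let u : Int := if 0 < i then
              acc.2 + (PySem.Str.count (PySem.Str.slice w (some (i + l - 1)) (some (i + l))) "U" : Int)
                    - (PySem.Str.count (PySem.Str.slice w (some (i - 1)) (some i)) "U" : Int)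
            else acc.2
          if u = 0 then
            (acc.1 ++ [(PySem.Str.slice w (some i) (some (i + l)), if i < l then l - i else 0)], u)
          else (acc.1, u))
        ([], (PySem.Str.count (PySem.Str.slice w none (some l)) "U" : Int))
      = (((PySem.List.pyRange 0 (k : Int) 1).filter (fun i => cntW w l i = 0)).map
           (fun i => (PySem.Str.slice w (some i) (some (i + l)),
                      if i < l then l - i else 0)),
         (cntW w l ((k : Int) - 1) : Int)) := by
  intro k
  induction k with
  | zero =>
    intro _
    rw [PySem.List.pyRange_one_eq_nil (by omega)]
    simp only [List.foldl_nil, List.filter_nil, List.map_nil]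
    rw [u0_eq w l hl]
    have h0 : ((-1:Int)).toNat = 0 := rfl
    norm_num [cntW, h0]
  | succ k ih =>
    intro hk
    have hk' : (k : Int) ≤ PySem.Str.len w - l + 1 := by push_cast at hk ⊢; omega
    rw [show ((k+1 : Nat) : Int) = (k : Int) + 1 by push_cast; ring,
        PySem.List.pyRange_one_succ_right (by omega), List.foldl_append, ih hk']
    simp only [List.foldl_cons, List.foldl_nil]
    have hn : k + l.toNat ≤ w.toList.length := by
      rw [PySem.Str.len_eq] at hk
      push_cast at hk
      omega
    have hu : (if 0 < (k:Int) then
          ((cntW w l ((k:Int)-1) : Nat) : Int)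
            + (PySem.Str.count (PySem.Str.slice w (some ((k:Int) + l - 1)) (some ((k:Int) + l))) "U" : Int)
            - (PySem.Str.count (PySem.Str.slice w (some ((k:Int) - 1)) (some (k:Int))) "U" : Int)
        else ((cntW w l ((k:Int)-1) : Nat) : Int)) = (cntW w l (k:Int) : Int) := by
      by_cases hk0 : k = 0
      · subst hk0
        rw [if_neg (by norm_num)]
        simp [cntW]
      · have h1k : 1 ≤ k := by omega
        have hlt : 0 < (k:Int) := by exact_mod_cast Nat.pos_of_ne_zero hk0
        rw [if_pos hlt]
        have hln : ((l.toNat : Nat) : Int) = l := Int.toNat_of_nonneg (by omega)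
        have ha : (k:Int) + l - 1 = ((k + l.toNat - 1 : Nat) : Int) := by omega
        have hb : (k:Int) + l = (((k + l.toNat - 1) + 1 : Nat) : Int) := by push_cast; omega
        have hc : (k:Int) - 1 = ((k - 1 : Nat) : Int) := by omega
        rw [ha, hb, hc, show (k:Int) = (((k-1) + 1 : Nat) : Int) by push_cast; omega,
            count_slice_nat, count_slice_nat]
        simp only [Nat.add_sub_cancel_left]
        have hroll := roll w.toList l.toNat k (by omega) h1k hn
        unfold cntW
        simp only [Int.toNat_natCast]
        rw [show ((k - 1 : Nat)) + 1 = k by omega]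
        omega
    rw [hu]
    by_cases hz : cntW w l (k:Int) = 0
    · have hz' : ((cntW w l (k:Int) : Nat) : Int) = 0 := by exact_mod_cast hz
      simp [hz, List.filter_append]
    · have hz' : ¬ (((cntW w l (k:Int) : Nat) : Int) = 0) := by exact_mod_cast hz
      simp [hz, List.filter_append]

-- 'U' not in s  ↔  s has no 'U' character
theorem noU_iff (s : String) : (PySem.Str.isIn "U" s = false) ↔ s.toList.count 'U' = 0 := by
  have h : "U".toList = ['U'] := rfl
  rw [← Bool.not_eq_true, not_iff_comm, PySem.Str.isIn_iff_infix, h, List.singleton_infix_iff,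
      ← List.count_pos_iff]
  omega

-- closed form for A's helper fold: filter + map
theorem gp_fold_closed (cond : Int → Bool) (f : Int → String) (g : Int → Int) :
    ∀ (is : List Int) (acc : List String × List Int),
      is.foldl (fun acc i => if cond i = false then (acc.1 ++ [f i], acc.2 ++ [g i]) else acc) acc
        = (acc.1 ++ ((is.filter (fun i => !cond i)).map f),
           acc.2 ++ ((is.filter (fun i => !cond i)).map g)) := by
  intro is
  induction is with
  | nil => intro acc; simp
  | cons i is ih =>
    intro acc
    by_cases h : cond i = false
    · simp [List.foldl_cons, h, ih]
    · simp at h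
      simp [List.foldl_cons, h, ih]

-- B's helper in closed form
theorem uFree_closed (w : String) (l : Int) (hl : 1 ≤ l) :
    uFree w l = ((PySem.List.pyRange 0 (PySem.Str.len w - l + 1) 1).filter
        (fun i => decide (cntW w l i = 0))).map
          (fun i => (PySem.Str.slice w (some i) (some (i + l)),
                     if i < l then l - i else 0)) := by
  unfold uFree
  by_cases hK : PySem.Str.len w - l + 1 ≤ 0
  · rw [PySem.List.pyRange_one_eq_nil hK]
    rfl
  · have hKc : PySem.Str.len w - l + 1 = (((PySem.Str.len w - l + 1).toNat : Nat) : Int) :=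
      (Int.toNat_of_nonneg (by omega)).symm
    rw [hKc, uFree_inv w l hl _ (by omega)]

-- A's helper equals B's helper split into its two components (positive length)
theorem getPep_eq_uFree (w : String) (l m : Int) (hl : 1 ≤ l) :
    getPepSequence w l m = ((uFree w l).map Prod.fst, (uFree w l).map Prod.snd) := by
  unfold getPepSequence
  rw [gp_fold_closed (fun i => PySem.Str.isIn "U" (PySem.Str.slice w (some i) (some (i + l))))
        (fun i => PySem.Str.slice w (some i) (some (i + l))) (fun i => max (l - i) 0),
      uFree_closed w l hl, List.map_map, List.map_map]
  have hfilter : (PySem.List.pyRange 0 (PySem.Str.len w - l + 1) 1).filter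
        (fun i => !(PySem.Str.isIn "U" (PySem.Str.slice w (some i) (some (i + l)))))
      = (PySem.List.pyRange 0 (PySem.Str.len w - l + 1) 1).filter
        (fun i => decide (cntW w l i = 0)) := by
    apply List.filter_congr
    intro i hi
    have h0 : 0 ≤ i := (PySem.List.mem_pyRange_one.mp hi).1
    have hcount : (PySem.Str.slice w (some i) (some (i + l))).toList.count 'U' = cntW w l i := by
      rw [PySem.Str.toList_slice, PySem.Chars.slice_eq_listSlice,
          PySem.List.slice_toNat w.toList h0 (by omega), show (i + l).toNat - i.toNat = l.toNat by omega]
      rfl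
    rcases hb : PySem.Str.isIn "U" (PySem.Str.slice w (some i) (some (i + l))) with _ | _
    · have := (noU_iff _).mp hb
      rw [hcount] at this
      simp [this]
    · have : ¬ ((PySem.Str.slice w (some i) (some (i + l))).toList.count 'U' = 0) := by
        intro hc
        rw [← noU_iff] at hc
        rw [hb] at hc
        simp at hc
      rw [hcount] at this
      simp [this]
  rw [hfilter]
  refine Prod.ext rfl ?_
  simp only
  apply List.map_congr_left
  intro i hi
  simp only [Function.comp]
  omega

-- Str.count as a character count of the slice's characters
theorem str_count_toList (s : String) : PySem.Str.count s "U" = s.toList.count 'U' := by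
  have h : "U".toList = ['U'] := rfl
  simp [h, count_single]

-- any slice of a 'U'-free string is 'U'-free
theorem slice_count_zero (w : String) (hU : 'U' ∉ w.toList) (a b : Option Int) :
    (PySem.Str.slice w a b).toList.count 'U' = 0 := by
  rw [PySem.Str.toList_slice, PySem.Chars.slice_eq_listSlice]
  exact List.count_eq_zero.mpr (fun hm => hU (PySem.List.mem_of_mem_slice w.toList a b hm))

-- the same window equality in the degenerate cases: l = 0, or a window without 'U'
theorem getPep_eq_uFree_free (w : String) (l m : Int)
    (h : l = 0 ∨ PySem.Str.isIn "U" w = false) :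
    getPepSequence w l m = ((uFree w l).map Prod.fst, (uFree w l).map Prod.snd) := by
  have hU : l ≠ 0 → 'U' ∉ w.toList := by
    intro hne
    rcases h with h | h
    · exact absurd h hne
    · exact fun hm => by
        have := (noU_iff w).mp h
        rw [List.count_eq_zero] at this
        exact this hm
  -- every peptide slice is 'U'-free
  have hcnt : ∀ i : Int, 0 ≤ i →
      (PySem.Str.slice w (some i) (some (i + l))).toList.count 'U' = 0 := by
    intro i hi
    by_cases h0 : l = 0
    · subst h0
      rw [PySem.Str.toList_slice, PySem.Chars.slice_eq_listSlice,
          PySem.List.slice_toNat w.toList hi (by omega),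
          show (i + 0).toNat - i.toNat = 0 by omega]
      simp
    · exact slice_count_zero w (hU h0) _ _
  -- both single-character update slices have the same 'U'-count
  have hcc : ∀ i : Int,
      PySem.Str.count (PySem.Str.slice w (some (i + l - 1)) (some (i + l))) "U"
        = PySem.Str.count (PySem.Str.slice w (some (i - 1)) (some i)) "U" := by
    intro i
    by_cases h0 : l = 0
    · subst h0
      rw [show i + 0 - 1 = i - 1 by ring, show i + 0 = i by ring]
    · rw [str_count_toList, str_count_toList,
          slice_count_zero w (hU h0) _ _, slice_count_zero w (hU h0) _ _]
  -- the initial rolling count is zero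
  have hu0 : PySem.Str.count (PySem.Str.slice w none (some l)) "U" = 0 := by
    by_cases h0 : l = 0
    · subst h0
      rw [str_count_toList, PySem.Str.toList_slice, PySem.Chars.slice_eq_listSlice,
          PySem.List.slice_to w.toList (by omega)]
      simp
    · rw [str_count_toList, slice_count_zero w (hU h0) _ _]
  -- B's fold appends every window, keeping u = 0
  have hfold : ∀ (is : List Int) (acc : List (String × Int)),
      is.foldl
        (fun (acc : List (String × Int) × Int) i =>
          let u : Int := if 0 < i then
              acc.2 + (PySem.Str.count (PySem.Str.slice w (some (i + l - 1)) (some (i + l))) "U" : Int)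
                    - (PySem.Str.count (PySem.Str.slice w (some (i - 1)) (some i)) "U" : Int)
            else acc.2
          if u = 0 then
            (acc.1 ++ [(PySem.Str.slice w (some i) (some (i + l)), if i < l then l - i else 0)], u)
          else (acc.1, u))
        (acc, (0 : Int))
      = (acc ++ is.map
          (fun i => (PySem.Str.slice w (some i) (some (i + l)), if i < l then l - i else 0)),
         (0 : Int)) := by
    intro is
    induction is with
    | nil => intro acc; simp
    | cons i is ih =>
      intro acc
      rw [List.foldl_cons]
      simp only [hcc i]
      have hz : (if 0 < i then (0:Int) + (PySem.Str.count (PySem.Str.slice w (some (i - 1)) (some i)) "U" : Int) - (PySem.Str.count (PySem.Str.slice w (some (i - 1)) (some i)) "U" : Int) else 0) = 0 := by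
        split <;> ring
      rw [hz, if_pos rfl, ih]
      simp
  -- A's fold appends every window too
  unfold getPepSequence uFree
  rw [gp_fold_closed (fun i => PySem.Str.isIn "U" (PySem.Str.slice w (some i) (some (i + l))))
        (fun i => PySem.Str.slice w (some i) (some (i + l))) (fun i => max (l - i) 0),
      hu0]
  push_cast
  rw [hfold _ []]
  have hfilter : (PySem.List.pyRange 0 (PySem.Str.len w - l + 1) 1).filter
        (fun i => !(PySem.Str.isIn "U" (PySem.Str.slice w (some i) (some (i + l)))))
      = PySem.List.pyRange 0 (PySem.Str.len w - l + 1) 1 := by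
    apply List.filter_eq_self.mpr
    intro i hi
    have h0 : 0 ≤ i := (PySem.List.mem_pyRange_one.mp hi).1
    have := (noU_iff _).mpr (hcnt i h0)
    rw [this]
    rfl
  rw [hfilter]
  simp only [List.nil_append, List.map_map]
  refine Prod.ext ?_ ?_ <;> simp only
  · apply List.map_congr_left
    intro i _
    rfl
  · apply List.map_congr_left
    intro i _
    simp only [Function.comp]
    omega

-- the window equality under the per-window precondition disjunct
theorem getPep_eq_uFree_any (w : String) (l m : Int)
    (h : 1 ≤ l ∨ l = 0 ∨ PySem.Str.isIn "U" w = false) :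
    getPepSequence w l m = ((uFree w l).map Prod.fst, (uFree w l).map Prod.snd) := by
  rcases h with h | h
  · exact getPep_eq_uFree w l m h
  · exact getPep_eq_uFree_free w l m h

-- ===== VERDICT (by name: the statement is the Claim_ definition above) =====
set_option maxHeartbeats 1000000 in
theorem window_around_mutation_spec : Claim_equal_window_around_mutation := by
  intro mutpos mut_seq orig_seq lengths _ hpre
  unfold Spec_window_around_mutation window_around_mutation window_around_mutation_alt
  apply PySem.List.foldl_congr_mem
  intro acc l hml
  have hl := hpre l hml
  have hmut : 1 ≤ l ∨ l = 0 ∨ PySem.Str.isIn "U"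
      (PySem.Str.slice mut_seq (some (max (mutpos - l + 1) 0)) (some (mutpos + l))) = false := by
    tauto
  have href : 1 ≤ l ∨ l = 0 ∨ PySem.Str.isIn "U"
      (PySem.Str.slice orig_seq (some (max (mutpos - l + 1) 0)) (some (mutpos + l))) = false := by
    tauto
  simp only [getPep_eq_uFree_any _ l _ hmut, getPep_eq_uFree_any _ l _ href]
  rw [PySem.List.foldl_prod_mk (f := fun a (pm : String × Int) => a ++ [pm.1])
        (g := fun a (pm : String × Int) => a ++ [pm.2]),
      PySem.List.foldl_append_singleton_eq_map, PySem.List.foldl_append_singleton_eq_map]
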